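-- pv_equiv track=rewrite | github.com/River/chip-seq-analysis | fjoin_rjmerge.py | get_linked_pairs
-- ===== SOURCE A (Python) =====
-- def get_index(s):
-- 	return s[3].split("_")[-1]
--
-- def get_linked_pairs(pairs):
-- 	linked_pairs = []
-- 	curr_links = [ pairs[0] ]
--
-- 	for curr_pair in range(len(pairs) - 1):
-- 		search_pair = curr_pair+1
-- 		if (get_index(pairs[search_pair][0]) > get_index(pairs[curr_pair][0])) and \
-- 		   (get_index(pairs[search_pair][1]) > get_index(pairs[curr_pair][1])):
-- 			linked_pairs.append(curr_links)
-- 			curr_links = [ pairs[curr_pair + 1] ]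
-- 		else:
-- 			curr_links.append(pairs[search_pair])
--
-- 	linked_pairs.append(curr_links)
-- 	return linked_pairs
-- ===== SOURCE B (Python) =====
-- def get_index(s):
-- 	return s[3].split("_")[-1]
--
-- def get_linked_pairs(pairs):
-- 	n = len(pairs)
-- 	boundaries = [0]
-- 	for i in range(1, n):
-- 		if get_index(pairs[i][0]) > get_index(pairs[i - 1][0]) and \
-- 		   get_index(pairs[i][1]) > get_index(pairs[i - 1][1]):
-- 			boundaries.append(i)
-- 	boundaries.append(n)
-- 	return [pairs[b:e] for b, e in zip(boundaries, boundaries[1:])]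
-- ===== Notes on version B (the rewrite author's own statement) =====
-- stated objective: alternative
-- what changed: Replaces A's single-pass accumulator (growing the current chain and the chain list element by element) with a two-pass scheme: first collect the break indices into a boundaries list, then slice the input into contiguous chains between consecutive boundaries.
import Mathlib
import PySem

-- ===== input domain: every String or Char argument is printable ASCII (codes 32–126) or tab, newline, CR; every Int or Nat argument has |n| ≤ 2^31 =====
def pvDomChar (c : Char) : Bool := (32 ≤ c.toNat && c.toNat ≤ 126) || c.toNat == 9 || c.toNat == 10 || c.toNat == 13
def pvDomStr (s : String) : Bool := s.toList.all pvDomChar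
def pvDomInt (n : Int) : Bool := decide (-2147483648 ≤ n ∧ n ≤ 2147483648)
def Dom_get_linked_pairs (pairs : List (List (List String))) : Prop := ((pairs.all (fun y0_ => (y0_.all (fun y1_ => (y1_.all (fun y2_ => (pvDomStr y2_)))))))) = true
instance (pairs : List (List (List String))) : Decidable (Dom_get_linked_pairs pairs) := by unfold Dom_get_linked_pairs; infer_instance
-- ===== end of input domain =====

-- B replaces A's single-pass accumulator with a two-pass decomposition (collect break
-- boundaries, then slice the input between consecutive boundaries); same O(n) cost.

-- get_index(s) = s[3].split("_")[-1]  (shared verbatim by A's module and Source B)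
def pvGetIndex (s : List String) : String :=
  PySem.List.pyGetD ((PySem.Str.split? (PySem.List.pyGetD s 3 "") "_").getD []) (-1) ""

-- the link condition between a pair and its successor (identical expression in both sources)
def pvLinked (a b : List (List String)) : Bool :=
  decide (pvGetIndex (PySem.List.pyGetD a 0 []) < pvGetIndex (PySem.List.pyGetD b 0 [])) &&
  decide (pvGetIndex (PySem.List.pyGetD a 1 []) < pvGetIndex (PySem.List.pyGetD b 1 []))

-- ===== PORT A =====
def get_linked_pairs (pairs : List (List (List String))) : List (List (List (List String))) :=
  let curr0 : List (List (List String)) := [PySem.List.pyGetD pairs 0 []]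
  let st :=
    (PySem.List.pyRange 0 ((pairs.length : Int) - 1)).foldl
      (fun (st : List (List (List (List String))) × List (List (List String))) curr_pair =>
        let search_pair := curr_pair + 1
        if pvLinked (PySem.List.pyGetD pairs curr_pair []) (PySem.List.pyGetD pairs search_pair []) then
          (st.1 ++ [st.2], [PySem.List.pyGetD pairs (curr_pair + 1) []])
        else
          (st.1, st.2 ++ [PySem.List.pyGetD pairs search_pair []]))
      (([] : List (List (List (List String)))), curr0)
  st.1 ++ [st.2]

-- ===== PORT B =====
def get_linked_pairs_alt (pairs : List (List (List String))) : List (List (List (List String))) :=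
  let n : Int := pairs.length
  let boundaries :=
    (PySem.List.pyRange 1 n).foldl
      (fun bs i =>
        if pvLinked (PySem.List.pyGetD pairs (i - 1) []) (PySem.List.pyGetD pairs i []) then
          bs ++ [i]
        else bs)
      [(0 : Int)]
  let boundaries2 := boundaries ++ [n]
  (boundaries2.zip (PySem.List.slice boundaries2 (some 1) none)).map
    (fun be => PySem.List.slice pairs (some be.1) (some be.2))

-- ===== PRECONDITION & SPEC =====
-- Pre_ = exactly the inputs on which Python A returns: a non-empty list, and — whenever the
-- loop runs at all (two or more pairs) — every pair has at least two members, each of the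
-- first two having at least 4 elements (so s[3] exists); elsewhere A raises IndexError.
def Pre_get_linked_pairs (pairs : List (List (List String))) : Prop :=
  pairs ≠ [] ∧
    (2 ≤ pairs.length → ∀ p ∈ pairs, 2 ≤ p.length ∧ ∀ q ∈ p.take 2, 4 ≤ q.length)
instance (pairs : List (List (List String))) : Decidable (Pre_get_linked_pairs pairs) := by
  unfold Pre_get_linked_pairs; infer_instance

def pvWitness_get_linked_pairs : List (List (List String)) :=
  [[["a", "b", "c", "x_1"], ["a", "b", "c", "x_2"]]]

def Spec_get_linked_pairs (pairs : List (List (List String))) (out : List (List (List (List String)))) : Prop := out = get_linked_pairs_alt pairs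
instance (pairs : List (List (List String))) (out : List (List (List (List String)))) : Decidable (Spec_get_linked_pairs pairs out) := by unfold Spec_get_linked_pairs; infer_instance

-- ===== CLAIM (what is proved, stated in full; the proofs are below) =====
def Claim_equal_get_linked_pairs : Prop := ∀ (pairs : List (List (List String))), Dom_get_linked_pairs pairs → Pre_get_linked_pairs pairs → Spec_get_linked_pairs pairs (get_linked_pairs pairs)

-- ===== LEMMAS AND PROOFS =====

-- the canonical structural grouping both ports are reduced to
def pvGo (prev : List (List String)) (cur : List (List (List String))) :
    List (List (List String)) → List (List (List (List String)))
  | [] => [cur]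
  | x :: xs => if pvLinked prev x then cur :: pvGo x [x] xs else pvGo x (cur ++ [x]) xs

-- slices of `pairs` between consecutive boundaries (last slice runs to the end)
def pvSlcs (pairs : List (List (List String))) : Nat → List Nat → List (List (List (List String)))
  | a, [] => [pairs.drop a]
  | a, b :: bs => (pairs.drop a).take (b - a) :: pvSlcs pairs b bs

-- B's break test, on Nat indices
def pvCN (pairs : List (List (List String))) (i : Nat) : Bool :=
  pvLinked (pairs.getD (i - 1) []) (pairs.getD i [])

theorem pvDrop_first {α : Type} {l : List α} {k : Nat} {x : α} {xs : List α} (d : α)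
    (h : l.drop k = x :: xs) : l.getD k d = x ∧ l.drop (k + 1) = xs := by
  constructor
  · have hx : l[k]? = some x := by
      have h0 : (l.drop k).head? = some x := by simp [h]
      rwa [List.head?_drop] at h0
    simp [List.getD_eq_getElem?_getD, hx]
  · have hd : l.drop (k + 1) = (l.drop k).drop 1 := by rw [List.drop_drop]
    simp [hd, h]

-- A's loop over range(len(pairs)-1), re-expressed as structural recursion on the suffix
theorem pvL1 (pairs : List (List (List String))) (xs : List (List (List String))) :
    ∀ (k : Nat) (prev : List (List String))
      (linked : List (List (List (List String)))) (cur : List (List (List String))),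
      pairs.drop k = prev :: xs →
      (((PySem.List.pyRange (k : Int) ((k : Int) + (xs.length : Int))).foldl
        (fun (st : List (List (List (List String))) × List (List (List String))) curr_pair =>
          let search_pair := curr_pair + 1
          if pvLinked (PySem.List.pyGetD pairs curr_pair []) (PySem.List.pyGetD pairs search_pair []) then
            (st.1 ++ [st.2], [PySem.List.pyGetD pairs (curr_pair + 1) []])
          else
            (st.1, st.2 ++ [PySem.List.pyGetD pairs search_pair []]))
        (linked, cur)).1 ++
       [((PySem.List.pyRange (k : Int) ((k : Int) + (xs.length : Int))).foldl
        (fun (st : List (List (List (List String))) × List (List (List String))) curr_pair =>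
          let search_pair := curr_pair + 1
          if pvLinked (PySem.List.pyGetD pairs curr_pair []) (PySem.List.pyGetD pairs search_pair []) then
            (st.1 ++ [st.2], [PySem.List.pyGetD pairs (curr_pair + 1) []])
          else
            (st.1, st.2 ++ [PySem.List.pyGetD pairs search_pair []]))
        (linked, cur)).2]) =
      linked ++ pvGo prev cur xs := by
  induction xs with
  | nil =>
    intro k prev linked cur h
    rw [show (k : Int) + ((List.length []) : Int) = (k : Int) from by simp]
    rw [PySem.List.pyRange_one_eq_nil (le_refl _)]
    simp [pvGo]
  | cons x xs ih =>
    intro k prev linked cur h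
    obtain ⟨hk, hdk⟩ := pvDrop_first ([] : List (List String)) h
    obtain ⟨hk1, hdk1⟩ := pvDrop_first ([] : List (List String)) hdk
    have hlt : (k : Int) < (k : Int) + (((x :: xs).length) : Int) := by
      push_cast [List.length_cons]; omega
    rw [PySem.List.pyRange_one_cons hlt, List.foldl_cons]
    have hc1 : (k : Int) + 1 = (((k + 1 : Nat)) : Int) := by push_cast; ring
    have hc2 : (k : Int) + (((x :: xs).length) : Int) = (((k + 1 : Nat)) : Int) + ((xs.length) : Int) := by
      push_cast [List.length_cons]; ring
    rw [hc1, hc2]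
    simp only [PySem.List.pyGetD_natCast, hk, hk1]
    cases hb : pvLinked prev x
    · simp only [Bool.false_eq_true, if_false]
      rw [ih (k + 1) x linked (cur ++ [x]) hdk]
      simp [pvGo, hb]
    · simp only [if_true]
      rw [ih (k + 1) x (linked ++ [cur]) [x] hdk]
      simp [pvGo, hb]

theorem pvA_eq_go (p : List (List String)) (xs : List (List (List String))) :
    get_linked_pairs (p :: xs) = pvGo p [p] xs := by
  have h := pvL1 (p :: xs) xs 0 p [] [p] (by simp)
  simp only [get_linked_pairs]
  simp only [Nat.cast_zero, zero_add] at h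
  have hn : (((p :: xs).length : Int) - 1) = ((xs.length) : Int) := by simp
  rw [hn, show PySem.List.pyGetD (p :: xs) 0 [] = p from by simp [PySem.List.pyGetD_zero_cons]]
  simpa using h

-- B's boundary loop over range(1, n) collects exactly the break indices
theorem pvBfold (pairs : List (List (List String))) (m : Nat) :
    ∀ (k : Nat) (acc : List Int), 1 ≤ k →
      (PySem.List.pyRange (k : Int) ((k : Int) + (m : Int))).foldl
        (fun bs i =>
          if pvLinked (PySem.List.pyGetD pairs (i - 1) []) (PySem.List.pyGetD pairs i []) then
            bs ++ [i]
          else bs) acc =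
      acc ++ ((List.range' k m).filter (pvCN pairs)).map (fun (j : Nat) => (j : Int)) := by
  induction m with
  | zero =>
    intro k acc _
    rw [show (k : Int) + ((0 : Nat) : Int) = (k : Int) from by simp]
    rw [PySem.List.pyRange_one_eq_nil (le_refl _)]
    simp
  | succ m ih =>
    intro k acc hk
    have hlt : (k : Int) < (k : Int) + (((m + 1 : Nat)) : Int) := by push_cast; omega
    rw [PySem.List.pyRange_one_cons hlt, List.foldl_cons]
    have hc1 : (k : Int) + (((m + 1 : Nat)) : Int) = (((k + 1 : Nat)) : Int) + ((m : Nat) : Int) := by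
      push_cast; ring
    have hc2 : (k : Int) - 1 = (((k - 1 : Nat)) : Int) := by omega
    have hc3 : (k : Int) + 1 = (((k + 1 : Nat)) : Int) := by push_cast; ring
    rw [hc1, hc2, hc3]
    have hcond : pvLinked (PySem.List.pyGetD pairs (((k - 1 : Nat)) : Int) [])
        (PySem.List.pyGetD pairs (k : Int) []) = pvCN pairs k := by
      simp only [PySem.List.pyGetD_natCast, pvCN]
    rw [List.range'_succ, List.filter_cons]
    simp only [hcond]
    cases hb : pvCN pairs k
    · simp only [Bool.false_eq_true, if_false]
      rw [ih (k + 1) acc (by omega)]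
    · simp only [if_true]
      rw [ih (k + 1) (acc ++ [(k : Int)]) (by omega)]
      simp

theorem pvZipSlices (pairs : List (List (List String))) :
    ∀ (ks : List Nat) (a : Nat),
      ((((a : Nat) : Int) :: (ks.map (fun (j : Nat) => (j : Int)) ++ [((pairs.length : Nat) : Int)])).zip
        (ks.map (fun (j : Nat) => (j : Int)) ++ [((pairs.length : Nat) : Int)])).map
        (fun be => PySem.List.slice pairs (some be.1) (some be.2)) =
      pvSlcs pairs a ks := by
  intro ks
  induction ks with
  | nil =>
    intro a
    simp [pvSlcs, PySem.List.slice_natCast, List.take_of_length_le]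
  | cons b ks ih =>
    intro a
    simp only [List.map_cons, List.cons_append, List.zip_cons_cons, List.map_cons]
    rw [ih b]
    simp [pvSlcs, PySem.List.slice_natCast]

-- slicing between consecutive break indices rebuilds the structural grouping
theorem pvL2 (pairs : List (List (List String))) (xs : List (List (List String))) :
    ∀ (k a : Nat) (prev : List (List String)),
      a ≤ k → pairs.drop k = prev :: xs →
      pvSlcs pairs a ((List.range' (k + 1) xs.length).filter (pvCN pairs)) =
      pvGo prev ((pairs.drop a).take (k + 1 - a)) xs := by
  induction xs with
  | nil =>
    intro k a prev hak h
    have hlen : pairs.length = k + 1 := by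
      have := congrArg List.length h
      simp at this; omega
    simp only [List.length_nil, List.range'_zero, List.filter_nil, pvSlcs, pvGo]
    have hd : (pairs.drop a).length = k + 1 - a := by simp [hlen]
    rw [List.take_of_length_le (by omega)]
  | cons x xs ih =>
    intro k a prev hak h
    obtain ⟨hk, hdk⟩ := pvDrop_first ([] : List (List String)) h
    obtain ⟨hk1, hdk1⟩ := pvDrop_first ([] : List (List String)) hdk
    rw [List.length_cons, List.range'_succ, List.filter_cons]
    have hcn : pvCN pairs (k + 1) = pvLinked prev x := by
      simp only [pvCN, Nat.add_sub_cancel, hk, hk1]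
    rw [hcn]
    cases hb : pvLinked prev x
    · simp only [Bool.false_eq_true, if_false]
      rw [ih (k + 1) a x (by omega) hdk]
      have hx : pairs[k + 1]? = some x := by
        rw [← List.head?_drop]; simp [hdk]
      have hsum : a + (k + 1 - a) = k + 1 := by omega
      have h2 : (pairs.drop a).take (k + 1 + 1 - a) =
          (pairs.drop a).take (k + 1 - a) ++ [x] := by
        rw [show k + 1 + 1 - a = (k + 1 - a) + 1 from by omega, List.take_add_one,
            List.getElem?_drop, hsum, hx]
        rfl
      rw [h2]
      simp [pvGo, hb]
    · simp only [if_true]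
      simp only [pvSlcs]
      rw [ih (k + 1) (k + 1) x (le_refl _) hdk]
      have h1 : (pairs.drop (k + 1)).take (k + 1 + 1 - (k + 1)) = [x] := by
        simp [hdk]
      rw [h1]
      simp [pvGo, hb]

theorem pvB_eq_go (p : List (List String)) (xs : List (List (List String))) :
    get_linked_pairs_alt (p :: xs) = pvGo p [p] xs := by
  have hb := pvBfold (p :: xs) xs.length 1 [(0 : Int)] (le_refl _)
  simp only [Nat.cast_one] at hb
  have hz := pvZipSlices (p :: xs) ((List.range' 1 xs.length).filter (pvCN (p :: xs))) 0
  have hl := pvL2 (p :: xs) xs 0 0 p (le_refl _) (by simp)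
  simp only [get_linked_pairs_alt]
  have hn : (((p :: xs).length : Int)) = 1 + ((xs.length) : Int) := by simp; ring
  rw [hn, hb, PySem.List.slice_from_one]
  have htake : ((p :: xs).drop 0).take (0 + 1 - 0) = [p] := by simp
  rw [htake] at hl
  rw [← hl, ← hz]
  have hcomm : (1 : Int) + ((xs.length) : Int) = ((xs.length) : Int) + 1 := by ring
  simp [hcomm]

-- ===== VERDICT (by name: the statement is the Claim_ definition above) =====
theorem get_linked_pairs_spec : Claim_equal_get_linked_pairs := by
  intro pairs _ hpre
  unfold Spec_get_linked_pairs
  obtain ⟨hne, -⟩ := hpre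
  cases pairs with
  | nil => exact absurd rfl hne
  | cons p xs => rw [pvA_eq_go, pvB_eq_go]
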